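-- pv_equiv track=rewrite | github.com/yuzhimanhua/SciMult | src/taser/models/biencoder_uni_contrib.py | get_seg_start_end
-- ===== SOURCE A (Python) =====
-- def get_seg_start_end(special_token_mask):
--     """Finds the indices for the first and last non-special tokens."""
--     start, end = 0, len(special_token_mask) - 1
--     if sum(special_token_mask) == len(special_token_mask):
--         raise ValueError("All tokens are special tokens!")
--     while special_token_mask[start] == 1:
--         start += 1
--     while special_token_mask[end] == 1:
--         end -= 1
--     return start, end
-- ===== SOURCE B (Python) =====
-- def get_seg_start_end(special_token_mask):
--     """Finds the indices for the first and last non-special tokens."""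
--     if sum(special_token_mask) == len(special_token_mask):
--         raise ValueError("All tokens are special tokens!")
--     idx = [i for i, v in enumerate(special_token_mask) if v != 1]
--     return idx[0], idx[-1]
-- ===== Notes on version B (the rewrite author's own statement) =====
-- stated objective: simpler
-- what changed: Replaces the two opposite-direction while scans over indices with a single forward pass that collects all non-special positions and returns the first and last of that list, keeping A's exact sum-based guard and ValueError message.
import Mathlib
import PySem

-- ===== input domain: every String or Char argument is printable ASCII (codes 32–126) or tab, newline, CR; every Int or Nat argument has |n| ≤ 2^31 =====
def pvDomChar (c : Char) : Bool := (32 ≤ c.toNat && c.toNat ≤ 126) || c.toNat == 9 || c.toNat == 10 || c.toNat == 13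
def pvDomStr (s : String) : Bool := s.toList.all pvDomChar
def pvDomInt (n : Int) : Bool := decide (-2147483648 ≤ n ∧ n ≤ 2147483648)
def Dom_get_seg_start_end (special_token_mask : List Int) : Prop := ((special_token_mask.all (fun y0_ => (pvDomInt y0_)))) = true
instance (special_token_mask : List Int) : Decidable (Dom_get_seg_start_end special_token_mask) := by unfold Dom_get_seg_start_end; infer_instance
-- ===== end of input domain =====

-- B replaces A's two opposite-direction while scans with one forward pass collecting the
-- non-special positions and reading off its endpoints (objective: simpler).

-- ===== PORT A =====
-- the `while special_token_mask[start] == 1: start += 1` loop, as structural recursion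
-- over the remaining suffix (i is the current index)
def pvFrontA : List Int → Int → Int
  | [], i => i
  | v :: rest, i => if v = 1 then pvFrontA rest (i + 1) else i

-- the `while special_token_mask[end] == 1: end -= 1` loop: the same scan walked over the
-- reversed list, decrementing the index
def pvBackA : List Int → Int → Int
  | [], i => i
  | v :: rest, i => if v = 1 then pvBackA rest (i - 1) else i

def get_seg_start_end (special_token_mask : List Int) : Int × Int :=
  (pvFrontA special_token_mask 0,
   pvBackA special_token_mask.reverse ((special_token_mask.length : Int) - 1))

-- ===== PORT B =====
-- idx = [i for i, v in enumerate(special_token_mask) if v != 1]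
def pvIdxB : List Int → Int → List Int
  | [], _ => []
  | v :: rest, i => if v ≠ 1 then i :: pvIdxB rest (i + 1) else pvIdxB rest (i + 1)

def get_seg_start_end_alt (special_token_mask : List Int) : Int × Int :=
  let idx := pvIdxB special_token_mask 0
  (idx.headD 0, idx.getLastD 0)   -- idx[0], idx[-1]; idx ≠ [] under Pre_

-- ===== PRECONDITION & SPEC =====
-- A (and B, with the same guard) raises ValueError exactly when sum == len.
def Pre_get_seg_start_end (special_token_mask : List Int) : Prop :=
  special_token_mask.sum ≠ (special_token_mask.length : Int)
instance (special_token_mask : List Int) : Decidable (Pre_get_seg_start_end special_token_mask) := by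
  unfold Pre_get_seg_start_end; infer_instance

def pvWitness_get_seg_start_end : List Int := [1, 0, 1]

def Spec_get_seg_start_end (special_token_mask : List Int) (out : Int × Int) : Prop := out = get_seg_start_end_alt special_token_mask
instance (special_token_mask : List Int) (out : Int × Int) : Decidable (Spec_get_seg_start_end special_token_mask out) := by unfold Spec_get_seg_start_end; infer_instance

-- ===== CLAIM (what is proved, stated in full; the proofs are below) =====
def Claim_equal_get_seg_start_end : Prop := ∀ (special_token_mask : List Int), Dom_get_seg_start_end special_token_mask → Pre_get_seg_start_end special_token_mask → Spec_get_seg_start_end special_token_mask (get_seg_start_end special_token_mask)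

-- ===== LEMMAS AND PROOFS =====

theorem pv_all_one_sum (m : List Int) (hc : ∀ v ∈ m, v = 1) :
    m.sum = (m.length : Int) := by
  induction m with
  | nil => simp
  | cons a t ih =>
    have ha : a = 1 := hc a (by simp)
    have ht := ih (fun v hv => hc v (List.mem_cons_of_mem _ hv))
    simp [ha, ht]; ring

theorem pv_exists_ne_one (m : List Int) (h : m.sum ≠ (m.length : Int)) :
    ∃ v ∈ m, v ≠ 1 := by
  by_contra hc
  push_neg at hc
  exact h (pv_all_one_sum m hc)

theorem pv_front_eq (m : List Int) (i : Int) (h : ∃ v ∈ m, v ≠ 1) :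
    pvFrontA m i = (pvIdxB m i).headD 0 := by
  induction m generalizing i with
  | nil => simp at h
  | cons a t ih =>
    by_cases ha : a = 1
    · have ht : ∃ v ∈ t, v ≠ 1 := by
        rcases h with ⟨v, hv, hne⟩
        rcases List.mem_cons.mp hv with rfl | hv'
        · exact absurd ha hne
        · exact ⟨v, hv', hne⟩
      simp [pvFrontA, pvIdxB, ha, ih _ ht]
    · simp [pvFrontA, pvIdxB, ha]

theorem pv_idx_append (m : List Int) (v : Int) (i : Int) :
    pvIdxB (m ++ [v]) i
      = pvIdxB m i ++ (if v = 1 then [] else [i + (m.length : Int)]) := by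
  induction m generalizing i with
  | nil => by_cases hv : v = 1 <;> simp [pvIdxB, hv]
  | cons a t ih =>
    by_cases ha : a = 1 <;>
      · simp [pvIdxB, ha, ih]
        by_cases hv : v = 1 <;> simp [hv] <;> ring_nf

theorem pv_back_eq (m : List Int) (i : Int) (h : ∃ v ∈ m, v ≠ 1) :
    pvBackA m.reverse (i + (m.length : Int) - 1) = (pvIdxB m i).getLastD 0 := by
  induction m using List.reverseRecOn generalizing i with
  | nil => simp at h
  | append_singleton t a ih =>
    rw [pv_idx_append]
    by_cases ha : a = 1
    · have ht : ∃ v ∈ t, v ≠ 1 := by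
        rcases h with ⟨v, hv, hne⟩
        rcases (List.mem_append.mp hv) with hv' | hv'
        · exact ⟨v, hv', hne⟩
        · simp at hv'; subst hv'; exact absurd ha hne
      simp only [List.reverse_append, List.reverse_singleton, List.singleton_append,
        pvBackA, ha, List.length_append, List.length_singleton, if_pos trivial,
        ite_true, List.append_nil]
      rw [show i + ((t.length + 1 : Nat) : Int) - 1 - 1 = i + (t.length : Int) - 1 from by
        push_cast; ring]
      exact ih _ ht
    · simp only [List.reverse_append, List.reverse_singleton, List.singleton_append,
        pvBackA, ha, List.length_append, List.length_singleton, if_neg ha, ite_false]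
      simp
      ring

-- ===== VERDICT (by name: the statement is the Claim_ definition above) =====
theorem get_seg_start_end_spec : Claim_equal_get_seg_start_end := by
  intro m _ hpre
  have h := pv_exists_ne_one m hpre
  show get_seg_start_end m = get_seg_start_end_alt m
  unfold get_seg_start_end get_seg_start_end_alt
  have hb := pv_back_eq m 0 h
  simp only [zero_add] at hb
  rw [pv_front_eq m 0 h, hb]
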